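-- pv_equiv track=rewrite | github.com/MrBrantCode/unitest_baseline | mut_generate/mist_train_cf/cf_91637/solution.py | largest_palindromic_number
-- ===== SOURCE A (Python) =====
-- def largest_palindromic_number(arr):
--     max_length = -1
--     max_index = -1
--
--     for i in range(len(arr)):
--         if str(arr[i]) == str(arr[i])[::-1]:
--             length = len(str(arr[i]))
--             if length > max_length:
--                 max_length = length
--                 max_index = i
--
--     return max_index
-- ===== SOURCE B (Python) =====
-- def largest_palindromic_number(arr):
--     def pal_len(x):
--         s = str(x)
--         return len(s) if s == s[::-1] else 0
--
--     best = max(map(pal_len, arr), default=0)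
--     if best == 0:
--         return -1
--     for i, x in enumerate(arr):
--         if pal_len(x) == best:
--             return i
--     return -1
-- ===== Notes on version B (the rewrite author's own statement) =====
-- stated objective: simpler
-- what changed: Replaces A's single pass tracking the (max_length, max_index) pair with two staged passes: first compute the maximum palindromic decimal length with max(..., default=0), then linearly search for the first index attaining it (0 meaning no palindrome, giving -1).
import Mathlib
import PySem

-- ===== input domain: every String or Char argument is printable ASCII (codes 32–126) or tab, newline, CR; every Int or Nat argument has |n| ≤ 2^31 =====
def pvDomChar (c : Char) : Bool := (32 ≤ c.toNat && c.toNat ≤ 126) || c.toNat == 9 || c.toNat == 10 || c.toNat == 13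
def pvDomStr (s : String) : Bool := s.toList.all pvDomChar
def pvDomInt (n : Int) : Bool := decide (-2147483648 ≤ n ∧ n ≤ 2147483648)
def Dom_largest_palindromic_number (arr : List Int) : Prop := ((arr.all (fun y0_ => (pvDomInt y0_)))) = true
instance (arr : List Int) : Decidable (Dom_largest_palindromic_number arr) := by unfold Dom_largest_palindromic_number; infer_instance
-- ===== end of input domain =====

-- B replaces A's single max-tracking pass by two staged passes (compute the max palindromic length, then find the first index attaining it); objective: simpler.

-- ===== PORT A =====
-- Single loop over indices, tracking (max_length, max_index).
def largest_palindromic_number (arr : List Int) : Int :=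
  ((PySem.List.enumerate arr).foldl
    (fun (st : Int × Int) (p : Int × Int) =>
      let s := PySem.Int.toChars p.2
      if s = s.reverse then
        let length : Int := (s.length : Int)
        if length > st.1 then (length, p.1) else st
      else st)
    (-1, -1)).2

-- ===== PORT B =====
-- helper pal_len: decimal length if palindrome, else 0
def pvPalLen (x : Int) : Int :=
  let s := PySem.Int.toChars x
  if s = s.reverse then (s.length : Int) else 0

-- second pass: for i, x in enumerate(arr): if pal_len(x) == best: return i; return -1
def pvFindIdx (best : Int) : Int → List Int → Int
  | _, [] => -1
  | i, x :: t => if pvPalLen x = best then i else pvFindIdx best (i + 1) t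

def largest_palindromic_number_alt (arr : List Int) : Int :=
  let best := (arr.map pvPalLen).foldl max 0
  if best = 0 then -1 else pvFindIdx best 0 arr

-- ===== PRECONDITION & SPEC =====
def Spec_largest_palindromic_number (arr : List Int) (out : Int) : Prop := out = largest_palindromic_number_alt arr
instance (arr : List Int) (out : Int) : Decidable (Spec_largest_palindromic_number arr out) := by unfold Spec_largest_palindromic_number; infer_instance

-- ===== CLAIM (what is proved, stated in full; the proofs are below) =====
def Claim_equal_largest_palindromic_number : Prop := ∀ (arr : List Int), Dom_largest_palindromic_number arr → Spec_largest_palindromic_number arr (largest_palindromic_number arr)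

-- ===== LEMMAS AND PROOFS =====

-- right-recursive spec: best palindromic length (≥ 1) paired with the leftmost relative index attaining it, or none
def pvS : List Int → Option (Int × Int)
  | [] => none
  | x :: t =>
      (pvS t).elim (if 0 < pvPalLen x then some (pvPalLen x, 0) else none)
        (fun bi => if bi.1 ≤ pvPalLen x then some (pvPalLen x, 0) else some (bi.1, bi.2 + 1))

-- abbreviation for A's loop body
def pvABody (st : Int × Int) (p : Int × Int) : Int × Int :=
  let s := PySem.Int.toChars p.2
  if s = s.reverse then
    let length : Int := (s.length : Int)
    if length > st.1 then (length, p.1) else st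
  else st

theorem pvToChars_ne_nil (n : Int) : PySem.Int.toChars n ≠ [] := by
  unfold PySem.Int.toChars
  split_ifs
  · simp
  · exact List.ne_nil_of_length_pos Nat.length_toDigits_pos

theorem pvPalLen_nonneg (x : Int) : 0 ≤ pvPalLen x := by
  simp only [pvPalLen]
  split_ifs <;> simp

theorem pvABody_eq (st : Int × Int) (p : Int × Int) :
    pvABody st p = if 0 < pvPalLen p.2 ∧ st.1 < pvPalLen p.2 then (pvPalLen p.2, p.1) else st := by
  simp only [pvABody]
  by_cases h : PySem.Int.toChars p.2 = (PySem.Int.toChars p.2).reverse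
  · have hpl : pvPalLen p.2 = ((PySem.Int.toChars p.2).length : Int) := by
      simp only [pvPalLen]
      rw [if_pos h]
    have hlen : 0 < ((PySem.Int.toChars p.2).length : Int) := by
      have := List.length_pos_of_ne_nil (pvToChars_ne_nil p.2)
      omega
    simp only [if_pos h, hpl]
    split_ifs with h1 h2 h2 <;> first | rfl | omega
  · have hpl : pvPalLen p.2 = 0 := by
      simp only [pvPalLen]
      rw [if_neg h]
    simp only [if_neg h, hpl]
    rw [if_neg (by omega)]

theorem pvS_cons_none (x : Int) (t : List Int) (ht : pvS t = none) :
    pvS (x :: t) = if 0 < pvPalLen x then some (pvPalLen x, 0) else none := by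
  simp [pvS, ht]

theorem pvS_cons_some (x : Int) (t : List Int) (b i : Int) (ht : pvS t = some (b, i)) :
    pvS (x :: t) = if b ≤ pvPalLen x then some (pvPalLen x, 0) else some (b, i + 1) := by
  simp [pvS, ht]

theorem pvS_pos : ∀ (l : List Int) (b i : Int), pvS l = some (b, i) → 1 ≤ b := by
  intro l
  induction l with
  | nil => intro b i h; simp [pvS] at h
  | cons x t ih =>
      intro b i h
      cases ht : pvS t with
      | none =>
          rw [pvS_cons_none x t ht] at h
          by_cases hp : 0 < pvPalLen x
          · rw [if_pos hp] at h; cases h; omega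
          · rw [if_neg hp] at h; cases h
      | some bi =>
          obtain ⟨b', i'⟩ := bi
          rw [pvS_cons_some x t b' i' ht] at h
          have hb' := ih b' i' ht
          by_cases hle : b' ≤ pvPalLen x
          · rw [if_pos hle] at h; cases h; omega
          · rw [if_neg hle] at h; cases h; omega

-- A's fold from a state with 1 ≤ m, over enumerate starting at k
theorem pvA1 : ∀ (l : List Int) (k m j : Int), 1 ≤ m →
    (PySem.List.enumerate l k).foldl pvABody (m, j)
      = (pvS l).elim (m, j) (fun bi => if m < bi.1 then (bi.1, k + bi.2) else (m, j)) := by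
  intro l
  induction l with
  | nil => intro k m j _; simp [PySem.List.enumerate_nil, pvS]
  | cons x t ih =>
      intro k m j hm
      rw [PySem.List.enumerate_cons, List.foldl_cons, pvABody_eq]
      simp only
      by_cases hup : 0 < pvPalLen x ∧ m < pvPalLen x
      · rw [if_pos hup, ih (k + 1) (pvPalLen x) k (by omega)]
        cases ht : pvS t with
        | none =>
            rw [pvS_cons_none x t ht, if_pos hup.1]
            simp only [Option.elim_none, Option.elim_some]
            rw [if_pos hup.2]
            norm_num
        | some bi =>
            obtain ⟨b', i'⟩ := bi
            have hb' := pvS_pos t b' i' ht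
            rw [pvS_cons_some x t b' i' ht]
            by_cases hle : b' ≤ pvPalLen x
            · rw [if_pos hle]
              simp only [Option.elim_some]
              rw [if_neg (by omega), if_pos hup.2]
              norm_num
            · rw [if_neg hle]
              simp only [Option.elim_some]
              rw [if_pos (by omega), if_pos (by omega)]
              simp
              omega
      · rw [if_neg hup, ih (k + 1) m j hm]
        have hp0 := pvPalLen_nonneg x
        cases ht : pvS t with
        | none =>
            rw [pvS_cons_none x t ht]
            by_cases hp : 0 < pvPalLen x
            · rw [if_pos hp]
              simp only [Option.elim_none, Option.elim_some]
              rw [if_neg (by omega)]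
            · rw [if_neg hp]
              rfl
        | some bi =>
            obtain ⟨b', i'⟩ := bi
            have hb' := pvS_pos t b' i' ht
            rw [pvS_cons_some x t b' i' ht]
            by_cases hle : b' ≤ pvPalLen x
            · rw [if_pos hle]
              simp only [Option.elim_some]
              rw [if_neg (by omega), if_neg (by omega)]
            · rw [if_neg hle]
              simp only [Option.elim_some]
              by_cases hmb : m < b'
              · rw [if_pos hmb, if_pos hmb]
                simp
                omega
              · rw [if_neg hmb, if_neg hmb]

-- A's fold from the initial state (-1, -1)
theorem pvA0 : ∀ (l : List Int) (k : Int),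
    (PySem.List.enumerate l k).foldl pvABody ((-1 : Int), (-1 : Int))
      = (pvS l).elim ((-1 : Int), (-1 : Int)) (fun bi => (bi.1, k + bi.2)) := by
  intro l
  induction l with
  | nil => intro k; simp [PySem.List.enumerate_nil, pvS]
  | cons x t ih =>
      intro k
      rw [PySem.List.enumerate_cons, List.foldl_cons, pvABody_eq]
      simp only
      have hp0 := pvPalLen_nonneg x
      by_cases hp : 0 < pvPalLen x
      · rw [if_pos ⟨hp, by omega⟩, pvA1 t (k + 1) (pvPalLen x) k hp]
        cases ht : pvS t with
        | none =>
            rw [pvS_cons_none x t ht, if_pos hp]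
            simp only [Option.elim_none, Option.elim_some]
            norm_num
        | some bi =>
            obtain ⟨b', i'⟩ := bi
            have hb' := pvS_pos t b' i' ht
            rw [pvS_cons_some x t b' i' ht]
            by_cases hle : b' ≤ pvPalLen x
            · rw [if_pos hle]
              simp only [Option.elim_some]
              rw [if_neg (by omega)]
              norm_num
            · rw [if_neg hle]
              simp only [Option.elim_some]
              rw [if_pos (by omega)]
              simp
              omega
      · rw [if_neg (by omega), ih (k + 1)]
        cases ht : pvS t with
        | none =>
            rw [pvS_cons_none x t ht, if_neg hp]
            rfl
        | some bi =>
            obtain ⟨b', i'⟩ := bi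
            have hb' := pvS_pos t b' i' ht
            rw [pvS_cons_some x t b' i' ht, if_neg (by omega)]
            simp only [Option.elim_some]
            simp
            omega

-- B's first pass computes pvS's best length (or 0)
theorem pvB1 : ∀ (l : List Int) (m : Int), 0 ≤ m →
    (l.map pvPalLen).foldl max m = (pvS l).elim m (fun bi => max m bi.1) := by
  intro l
  induction l with
  | nil => intro m _; simp [pvS]
  | cons x t ih =>
      intro m hm
      have hp0 := pvPalLen_nonneg x
      rw [List.map_cons, List.foldl_cons, ih (max m (pvPalLen x)) (by omega)]
      cases ht : pvS t with
      | none =>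
          rw [pvS_cons_none x t ht]
          by_cases hp : 0 < pvPalLen x
          · rw [if_pos hp]
            simp only [Option.elim_none, Option.elim_some]
          · rw [if_neg hp]
            simp only [Option.elim_none]
            omega
      | some bi =>
          obtain ⟨b', i'⟩ := bi
          rw [pvS_cons_some x t b' i' ht]
          by_cases hle : b' ≤ pvPalLen x
          · rw [if_pos hle]
            simp only [Option.elim_some]
            simp
            omega
          · rw [if_neg hle]
            simp only [Option.elim_some]
            simp
            omega

-- B's second pass finds the leftmost index of the maximum
theorem pvB2 : ∀ (l : List Int) (k b i : Int), pvS l = some (b, i) → pvFindIdx b k l = k + i := by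
  intro l
  induction l with
  | nil => intro k b i h; simp [pvS] at h
  | cons x t ih =>
      intro k b i h
      cases ht : pvS t with
      | none =>
          rw [pvS_cons_none x t ht] at h
          by_cases hp : 0 < pvPalLen x
          · rw [if_pos hp] at h
            simp only [Option.some.injEq, Prod.mk.injEq] at h
            obtain ⟨rfl, rfl⟩ := h
            unfold pvFindIdx
            rw [if_pos rfl]
            omega
          · rw [if_neg hp] at h; cases h
      | some bi =>
          obtain ⟨b', i'⟩ := bi
          rw [pvS_cons_some x t b' i' ht] at h
          have hb' := pvS_pos t b' i' ht
          by_cases hle : b' ≤ pvPalLen x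
          · rw [if_pos hle] at h
            simp only [Option.some.injEq, Prod.mk.injEq] at h
            obtain ⟨rfl, rfl⟩ := h
            unfold pvFindIdx
            rw [if_pos rfl]
            omega
          · rw [if_neg hle] at h
            simp only [Option.some.injEq, Prod.mk.injEq] at h
            obtain ⟨rfl, rfl⟩ := h
            unfold pvFindIdx
            rw [if_neg (by omega), ih (k + 1) b' i' ht]
            omega

-- ===== VERDICT (by name: the statement is the Claim_ definition above) =====
theorem largest_palindromic_number_spec : Claim_equal_largest_palindromic_number := by
  intro arr _
  unfold Spec_largest_palindromic_number largest_palindromic_number largest_palindromic_number_alt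
  have hA := pvA0 arr 0
  have hB := pvB1 arr 0 le_rfl
  rw [show (fun (st : Int × Int) (p : Int × Int) =>
      let s := PySem.Int.toChars p.2
      if s = s.reverse then
        let length : Int := (s.length : Int)
        if length > st.1 then (length, p.1) else st
      else st) = pvABody from rfl, hA, hB]
  cases ht : pvS arr with
  | none => simp
  | some bi =>
      obtain ⟨b, i⟩ := bi
      have hb := pvS_pos arr b i ht
      simp only [Option.elim_some]
      rw [if_neg (by omega), show max 0 b = b by omega, pvB2 arr 0 b i ht]
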